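-- pv_equiv track=rewrite | github.com/Tosaaaki/QuantRabbit | workers/common/brain.py | _select_persona_key
-- ===== SOURCE A (Python) =====
-- def _select_persona_key(tag: str) -> str:
--     text = str(tag or "").strip().lower()
--     if not text:
--         return "neutral"
--     tokens = [t for t in text.replace("-", "_").split("_") if t]
--     token_set = set(tokens)
--     if "range" in token_set or "revert" in token_set or "reversion" in token_set or "fade" in token_set:
--         return "range"
--     if "bbrsi" in token_set or "bb" in token_set or "rsi" in token_set:
--         return "range"
--     if "vwap" in token_set or "levelreactor" in token_set or "magnet" in token_set:
--         return "range"
--     if "pullback" in token_set or "retest" in token_set: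
--         return "pullback"
--     if "trend" in token_set or "donchian" in token_set or "breakout" in token_set:
--         return "trend"
--     if "momentum" in token_set or "impulse" in token_set or "burst" in token_set or "squeeze" in token_set:
--         return "momentum"
--     if "scalp" in token_set:
--         return "scalp"
--     return "neutral"
-- ===== SOURCE B (Python) =====
-- _GROUPS = [
--     ("range", "revert", "reversion", "fade", "bbrsi", "bb", "rsi", "vwap", "levelreactor", "magnet"),
--     ("pullback", "retest"),
--     ("trend", "donchian", "breakout"),
--     ("momentum", "impulse", "burst", "squeeze"),
--     ("scalp",),
-- ]
-- _RANK = {kw: i for i, kws in enumerate(_GROUPS) for kw in kws}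
-- _PERSONAS = ["range", "pullback", "trend", "momentum", "scalp", "neutral"]
--
--
-- def _select_persona_key(tag: str) -> str:
--     text = str(tag or "").strip().lower()
--     if not text:
--         return "neutral"
--     best = 5
--     for t in text.replace("-", "_").split("_"):
--         if t:
--             best = min(best, _RANK.get(t, 5))
--     return _PERSONAS[best]
-- ===== Notes on version B (the rewrite author's own statement) =====
-- stated objective: simpler
-- what changed: Replaces the seven-branch membership if-chain with a keyword->priority dict and a single min-rank fold over the tokens, indexing a persona table with the best rank.
import Mathlib
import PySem

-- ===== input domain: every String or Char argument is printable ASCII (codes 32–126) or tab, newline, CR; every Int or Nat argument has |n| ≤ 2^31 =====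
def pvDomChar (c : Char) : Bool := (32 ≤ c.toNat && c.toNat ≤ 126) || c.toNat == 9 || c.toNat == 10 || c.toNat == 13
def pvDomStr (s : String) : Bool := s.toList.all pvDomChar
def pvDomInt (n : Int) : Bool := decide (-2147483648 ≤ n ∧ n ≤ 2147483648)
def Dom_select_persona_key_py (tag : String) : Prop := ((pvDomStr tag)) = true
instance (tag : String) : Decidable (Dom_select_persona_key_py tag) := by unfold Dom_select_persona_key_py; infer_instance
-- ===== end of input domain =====

-- B replaces A's seven-branch membership if-chain by a keyword->priority table and a single
-- min-rank fold over the tokens (simpler; same asymptotic cost).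

-- ===== PORT A =====
-- helper: A's if-chain over the token set (literal branch order preserved)
def pvChainA (token_set : PySem.Set String) : String :=
  if PySem.Set.contains token_set "range" || PySem.Set.contains token_set "revert" ||
     PySem.Set.contains token_set "reversion" || PySem.Set.contains token_set "fade" then "range"
  else if PySem.Set.contains token_set "bbrsi" || PySem.Set.contains token_set "bb" ||
     PySem.Set.contains token_set "rsi" then "range"
  else if PySem.Set.contains token_set "vwap" || PySem.Set.contains token_set "levelreactor" ||
     PySem.Set.contains token_set "magnet" then "range"
  else if PySem.Set.contains token_set "pullback" || PySem.Set.contains token_set "retest" then "pullback"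
  else if PySem.Set.contains token_set "trend" || PySem.Set.contains token_set "donchian" ||
     PySem.Set.contains token_set "breakout" then "trend"
  else if PySem.Set.contains token_set "momentum" || PySem.Set.contains token_set "impulse" ||
     PySem.Set.contains token_set "burst" || PySem.Set.contains token_set "squeeze" then "momentum"
  else if PySem.Set.contains token_set "scalp" then "scalp"
  else "neutral"

def select_persona_key_py (tag : String) : String :=
  let text := PySem.Str.lower (PySem.Str.strip (if tag = "" then "" else tag))
  if text = "" then "neutral"
  else
    -- s.split("_") with the literal nonempty separator; .getD [] only totalises (split? is some since "_" ≠ "")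
    let tokens := ((PySem.Str.split? (PySem.Str.replace text "-" "_") "_").getD []).filter (fun t => t ≠ "")
    pvChainA (PySem.Set.ofList tokens)

-- ===== PORT B =====
-- the dict comprehension of Source B, written out as the literal association dict it builds
def pvRankTable : PySem.Dict String Nat := PySem.Dict.mk
  [("range",0),("revert",0),("reversion",0),("fade",0),("bbrsi",0),("bb",0),("rsi",0),("vwap",0),("levelreactor",0),("magnet",0),
   ("pullback",1),("retest",1),
   ("trend",2),("donchian",2),("breakout",2),
   ("momentum",3),("impulse",3),("burst",3),("squeeze",3),
   ("scalp",4)]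

def pvPersonas : List String := ["range","pullback","trend","momentum","scalp","neutral"]

def select_persona_key_py_alt (tag : String) : String :=
  let text := PySem.Str.lower (PySem.Str.strip (if tag = "" then "" else tag))
  if text = "" then "neutral"
  else
    let best := ((PySem.Str.split? (PySem.Str.replace text "-" "_") "_").getD []).foldl
      (fun b t => if t ≠ "" then min b (PySem.Dict.getD pvRankTable t 5) else b) 5
    pvPersonas.getD best "neutral"

-- ===== PRECONDITION & SPEC =====
def Spec_select_persona_key_py (tag : String) (out : String) : Prop := out = select_persona_key_py_alt tag
instance (tag : String) (out : String) : Decidable (Spec_select_persona_key_py tag out) := by unfold Spec_select_persona_key_py; infer_instance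

-- ===== CLAIM (what is proved, stated in full; the proofs are below) =====
def Claim_equal_select_persona_key_py : Prop := ∀ (tag : String), Dom_select_persona_key_py tag → Spec_select_persona_key_py tag (select_persona_key_py tag)

-- ===== LEMMAS AND PROOFS =====
def pvRank (t : String) : Nat := PySem.Dict.getD pvRankTable t 5
def pvMinR (ts : List String) : Nat := ts.foldl (fun b t => min b (pvRank t)) 5

lemma getD_mk_le (t : String) (l : List (String × Nat)) (h : ∀ p ∈ l, p.2 ≤ 5) :
    (PySem.Dict.mk l).getD t 5 ≤ 5 := by
  induction l with
  | nil => simp [PySem.Dict.getD, PySem.Dict.get?]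
  | cons p l ih =>
    obtain ⟨k, v⟩ := p
    simp only [PySem.Dict.getD, PySem.Dict.get?_mk_cons] at *
    by_cases hk : k == t
    · simp only [hk, if_true]
      exact h (k, v) (by simp)
    · simp only [hk, Bool.false_eq_true, if_false]
      exact ih fun p hp => h p (List.mem_cons_of_mem _ hp)

lemma getD_mk_mem (t : String) (k : Nat) (l : List (String × Nat)) (hne : k ≠ 5)
    (h : (PySem.Dict.mk l).getD t 5 = k) : (t, k) ∈ l := by
  induction l with
  | nil => simp [PySem.Dict.getD, PySem.Dict.get?] at h; omega
  | cons p l ih =>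
    obtain ⟨k0, v⟩ := p
    simp only [PySem.Dict.getD, PySem.Dict.get?_mk_cons] at h
    by_cases hk : k0 == t
    · simp only [hk, if_true] at h
      simp only [Option.getD_some] at h
      rw [← eq_of_beq hk, ← h]
      exact List.mem_cons_self
    · simp only [hk, Bool.false_eq_true, if_false] at h
      exact List.mem_cons_of_mem _ (ih h)

lemma pvRank_le (t : String) : pvRank t ≤ 5 := getD_mk_le t _ (by simp)

lemma pvMinR_acc : ∀ (ts : List String) (b : Nat), b ≤ 5 →
    ts.foldl (fun b t => min b (pvRank t)) b = min b (pvMinR ts)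
  | [], b, hb => by simp [pvMinR]; omega
  | t :: ts, b, hb => by
    have hr := pvRank_le t
    have h1 := pvMinR_acc ts (min b (pvRank t)) (by omega)
    have h2 := pvMinR_acc ts (min 5 (pvRank t)) (by omega)
    simp only [pvMinR, List.foldl_cons] at *
    omega

lemma pvMinR_cons (t : String) (ts : List String) :
    pvMinR (t :: ts) = min (pvRank t) (pvMinR ts) := by
  have hr := pvRank_le t
  have h2 := pvMinR_acc ts (min 5 (pvRank t)) (by omega)
  simp only [pvMinR, List.foldl_cons] at *
  omega

lemma pvMinR_le5 (ts : List String) : pvMinR ts ≤ 5 := by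
  induction ts with
  | nil => simp [pvMinR]
  | cons t ts ih => rw [pvMinR_cons]; omega

lemma pvMinR_lb (ts : List String) (t : String) (h : t ∈ ts) : pvMinR ts ≤ pvRank t := by
  induction ts with
  | nil => simp at h
  | cons s ts ih =>
    rw [pvMinR_cons]
    rcases List.mem_cons.mp h with h | h
    · subst h; omega
    · have := ih h; omega

lemma pvMinR_attained (ts : List String) (h : pvMinR ts ≠ 5) :
    ∃ t ∈ ts, pvRank t = pvMinR ts := by
  induction ts with
  | nil => simp [pvMinR] at h
  | cons t ts ih =>
    rw [pvMinR_cons] at h ⊢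
    by_cases hc : pvRank t ≤ pvMinR ts
    · exact ⟨t, List.mem_cons_self, by omega⟩
    · have h5 : pvMinR ts ≠ 5 := by omega
      obtain ⟨s, hs, hr⟩ := ih h5
      exact ⟨s, List.mem_cons_of_mem _ hs, by omega⟩

lemma pvRank_range : pvRank "range" = 0 := by decide
lemma pvRank_revert : pvRank "revert" = 0 := by decide
lemma pvRank_reversion : pvRank "reversion" = 0 := by decide
lemma pvRank_fade : pvRank "fade" = 0 := by decide
lemma pvRank_bbrsi : pvRank "bbrsi" = 0 := by decide
lemma pvRank_bb : pvRank "bb" = 0 := by decide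
lemma pvRank_rsi : pvRank "rsi" = 0 := by decide
lemma pvRank_vwap : pvRank "vwap" = 0 := by decide
lemma pvRank_levelreactor : pvRank "levelreactor" = 0 := by decide
lemma pvRank_magnet : pvRank "magnet" = 0 := by decide
lemma pvRank_pullback : pvRank "pullback" = 1 := by decide
lemma pvRank_retest : pvRank "retest" = 1 := by decide
lemma pvRank_trend : pvRank "trend" = 2 := by decide
lemma pvRank_donchian : pvRank "donchian" = 2 := by decide
lemma pvRank_breakout : pvRank "breakout" = 2 := by decide
lemma pvRank_momentum : pvRank "momentum" = 3 := by decide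
lemma pvRank_impulse : pvRank "impulse" = 3 := by decide
lemma pvRank_burst : pvRank "burst" = 3 := by decide
lemma pvRank_squeeze : pvRank "squeeze" = 3 := by decide
lemma pvRank_scalp : pvRank "scalp" = 4 := by decide

set_option maxHeartbeats 1000000 in
lemma pv_main (ts : List String) :
    pvChainA (PySem.Set.ofList ts) = pvPersonas.getD (pvMinR ts) "neutral" := by
  have hcf : ∀ s : String, pvRank s < pvMinR ts → ¬ s ∈ ts := by
    intro s hs hmem
    have := pvMinR_lb ts s hmem
    omega
  have hm5 := pvMinR_le5 ts
  have hatt := pvMinR_attained ts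
  have hsplit : pvMinR ts = 0 ∨ pvMinR ts = 1 ∨ pvMinR ts = 2 ∨ pvMinR ts = 3 ∨
      pvMinR ts = 4 ∨ pvMinR ts = 5 := by omega
  rcases hsplit with h | h | h | h | h | h <;> rw [h] at hcf hatt ⊢
  all_goals (
    first
    | (simp [pvChainA, pvPersonas, hcf, pvRank_range, pvRank_revert, pvRank_reversion, pvRank_fade, pvRank_bbrsi, pvRank_bb, pvRank_rsi, pvRank_vwap, pvRank_levelreactor, pvRank_magnet, pvRank_pullback, pvRank_retest, pvRank_trend, pvRank_donchian, pvRank_breakout, pvRank_momentum, pvRank_impulse, pvRank_burst, pvRank_squeeze, pvRank_scalp]; done)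
    | (obtain ⟨t, hts, htr⟩ := hatt (by omega)
       have hmem := getD_mk_mem t _ _ (by omega) htr
       simp only [pvRankTable] at hmem
       simp only [List.mem_cons, Prod.mk.injEq, List.not_mem_nil, or_false] at hmem
       rcases hmem with ⟨ht, h0⟩ | ⟨ht, h0⟩ | ⟨ht, h0⟩ | ⟨ht, h0⟩ | ⟨ht, h0⟩ | ⟨ht, h0⟩ |
         ⟨ht, h0⟩ | ⟨ht, h0⟩ | ⟨ht, h0⟩ | ⟨ht, h0⟩ | ⟨ht, h0⟩ | ⟨ht, h0⟩ | ⟨ht, h0⟩ |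
         ⟨ht, h0⟩ | ⟨ht, h0⟩ | ⟨ht, h0⟩ | ⟨ht, h0⟩ | ⟨ht, h0⟩ | ⟨ht, h0⟩ | ⟨ht, h0⟩ <;>
         first
           | omega
           | (subst ht
              unfold pvChainA
              split_ifs <;> simp_all [pvPersonas, hcf, pvRank_range, pvRank_revert, pvRank_reversion, pvRank_fade, pvRank_bbrsi, pvRank_bb, pvRank_rsi, pvRank_vwap, pvRank_levelreactor, pvRank_magnet, pvRank_pullback, pvRank_retest, pvRank_trend, pvRank_donchian, pvRank_breakout, pvRank_momentum, pvRank_impulse, pvRank_burst, pvRank_squeeze, pvRank_scalp]))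
  )

-- bridge: Source B's guarded fold over all split pieces = the plain min-fold over the nonempty pieces
lemma pv_guard (l : List String) (b : Nat) :
    l.foldl (fun b t => if t ≠ "" then min b (PySem.Dict.getD pvRankTable t 5) else b) b
      = (l.filter (fun t => t ≠ "")).foldl (fun b t => min b (pvRank t)) b := by
  induction l generalizing b with
  | nil => rfl
  | cons t l ih =>
    rw [List.foldl_cons, List.filter_cons]
    by_cases ht : t = ""
    · rw [if_neg (by simp [ht]), if_neg (by simp [ht])]
      exact ih b
    · rw [if_pos ht, if_pos (by simp [ht]), List.foldl_cons]
      exact ih _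

set_option maxHeartbeats 1000000 in
-- ===== VERDICT (by name: the statement is the Claim_ definition above) =====
theorem select_persona_key_py_spec : Claim_equal_select_persona_key_py := by
  intro tag _
  unfold Spec_select_persona_key_py select_persona_key_py select_persona_key_py_alt
  dsimp only
  split_ifs <;> first
    | (rw [pv_guard]; exact pv_main _)
    | rfl
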